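-- pv_equiv track=rewrite | github.com/AmrasElessar/adminpdftoolkit | core/distribution.py | distribute_sequential
-- ===== SOURCE A (Python) =====
-- from typing import Any
--
-- def distribute_sequential(records: list[Any], teams: list[str]) -> dict[str, list[Any]]:
--     """Split records into contiguous blocks, one per team."""
--     out: dict[str, list[Any]] = {t: [] for t in teams}
--     if not teams or not records:
--         return out
--     n = len(records)
--     per = n // len(teams)
--     extra = n % len(teams)
--     i = 0
--     for j, t in enumerate(teams):
--         size = per + (1 if j < extra else 0)
--         out[t] = records[i : i + size]
--         i += size
--     return out
-- ===== SOURCE B (Python) =====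
-- def distribute_sequential(records, teams):
--     """Split records into contiguous blocks, one per team."""
--     out = {}
--     it = iter(records)
--     r = len(records)
--     for t, m in zip(teams, range(len(teams), 0, -1)):
--         cut = -(-r // m)
--         out[t] = [next(it) for _ in range(cut)]
--         r -= cut
--     return out
-- ===== Notes on version B (the rewrite author's own statement) =====
-- stated objective: simpler
-- what changed: Instead of precomputing per=n//k and extra=n%k and carrying a running start offset over a dict pre-initialised with empty lists, B peels the records off an iterator: each team in turn takes ceil(remaining/teams_left) records, with the dict built by the loop itself.
import Mathlib
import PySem

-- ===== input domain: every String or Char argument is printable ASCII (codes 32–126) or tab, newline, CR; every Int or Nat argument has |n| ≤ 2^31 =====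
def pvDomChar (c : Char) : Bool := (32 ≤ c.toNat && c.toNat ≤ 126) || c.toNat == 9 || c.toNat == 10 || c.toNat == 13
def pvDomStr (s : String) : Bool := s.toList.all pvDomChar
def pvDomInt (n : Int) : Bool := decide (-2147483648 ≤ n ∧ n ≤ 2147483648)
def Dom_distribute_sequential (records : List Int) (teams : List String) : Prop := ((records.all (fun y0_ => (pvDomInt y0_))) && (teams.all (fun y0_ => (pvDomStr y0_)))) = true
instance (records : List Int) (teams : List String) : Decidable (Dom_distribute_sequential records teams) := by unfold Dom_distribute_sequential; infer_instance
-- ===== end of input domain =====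

-- B replaces A's per/extra arithmetic and running offset over a pre-initialised dict by a
-- peel loop: each team takes ceil(len(rest)/teams_left) records off the front of the rest.

-- ===== PORT A =====
-- the 'for j, t in enumerate(teams)' loop of A, with state (i, out)
def pvLoopA (records : List Int) (per extra : Int) :
    Int → List (Int × String) → PySem.Dict String (List Int) → PySem.Dict String (List Int)
  | _, [], out => out
  | i, (j, t) :: rest, out =>
      let size := per + (if j < extra then 1 else 0)
      pvLoopA records per extra (i + size) rest
        (out.insert t (PySem.List.slice records (some i) (some (i + size))))

def distribute_sequential (records : List Int) (teams : List String) : List (String × List Int) :=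
  let out : PySem.Dict String (List Int) :=
    teams.foldl (fun d t => d.insert t ([] : List Int)) PySem.Dict.empty
  if teams = [] ∨ records = [] then out.items
  else
    let n := PySem.List.len records
    let per := PySem.Int.floordiv n (PySem.List.len teams)
    let extra := PySem.Int.mod n (PySem.List.len teams)
    (pvLoopA records per extra 0 (PySem.List.enumerate teams 0) out).items

-- ===== PORT B =====
-- the 'for t, m in zip(teams, range(len(teams), 0, -1))' loop of B, with state (it, r, out);
-- the iterator 'it' is the not-yet-consumed suffix of records, '[next(it) for _ in range(cut)]'
-- takes its first cut elements and leaves the rest (take/drop — exact, cut is never negative here)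
def pvLoopB : List Int → Int → List (String × Int) → PySem.Dict String (List Int) → PySem.Dict String (List Int)
  | _, _, [], out => out
  | it, r, (t, m) :: ps, out =>
      let cut := -(PySem.Int.floordiv (-r) m)
      pvLoopB (it.drop cut.toNat) (r - cut) ps
        (out.insert t (it.take cut.toNat))

def distribute_sequential_alt (records : List Int) (teams : List String) : List (String × List Int) :=
  (pvLoopB records (PySem.List.len records) (teams.zip (PySem.List.pyRange (PySem.List.len teams) 0 (-1))) PySem.Dict.empty).items

-- ===== PRECONDITION & SPEC =====
def Spec_distribute_sequential (records : List Int) (teams : List String) (out : List (String × List Int)) : Prop := out = distribute_sequential_alt records teams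
instance (records : List Int) (teams : List String) (out : List (String × List Int)) : Decidable (Spec_distribute_sequential records teams out) := by unfold Spec_distribute_sequential; infer_instance

-- ===== CLAIM (what is proved, stated in full; the proofs are below) =====
def Claim_equal_distribute_sequential : Prop := ∀ (records : List Int) (teams : List String), Dom_distribute_sequential records teams → Spec_distribute_sequential records teams (distribute_sequential records teams)

-- ===== LEMMAS AND PROOFS =====

lemma pvLoops_eq (records : List Int) (per extra : Nat) :
    ∀ (ts : List String) (j i : Nat) (d : PySem.Dict String (List Int)),
    extra ≤ j + ts.length →
    records.length = i + (per * ts.length + (extra - j)) →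
    pvLoopA records (per : Int) (extra : Int) (i : Int) (PySem.List.enumerate ts (j : Int)) d
      = pvLoopB (records.drop i) ((records.drop i).length : Int)
          (ts.zip (PySem.List.pyRange (ts.length : Int) 0 (-1))) d := by
  intro ts
  induction ts with
  | nil => intro j i d _ _; simp [PySem.List.enumerate_nil, pvLoopA, pvLoopB]
  | cons t ts ih =>
    intro j i d hex hlen
    simp only [List.length_cons] at hex hlen ⊢
    have hmul : per * (ts.length + 1) = per * ts.length + per := by ring
    have hm : (0:Int) < ((ts.length : Nat) + 1 : Int) := by positivity
    have hmcast : ((ts.length + 1 : Nat) : Int) = ((ts.length : Nat) : Int) + 1 := by push_cast; ring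
    rw [PySem.List.enumerate_cons, hmcast, PySem.List.pyRange_neg_one_cons (by omega)]
    simp only [List.zip_cons_cons, pvLoopA, pvLoopB]
    set szN : Nat := per + (if j < extra then 1 else 0) with hszN
    have hsize : (per : Int) + (if (j:Int) < (extra:Int) then (1:Int) else 0) = (szN : Int) := by
      by_cases hj : j < extra <;> simp [hszN, hj]
    rw [hmul] at hlen
    have hi : i ≤ records.length := by omega
    have hr : (records.drop i).length = per * ts.length + per + (extra - j) := by
      rw [List.length_drop]; omega
    have hrZ : ((records.drop i).length : Int)
        = (per:Int) * (ts.length:Int) + (per:Int) + ((extra - j : Nat) : Int) := by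
      rw [hr]; push_cast; ring
    have hcut : -(PySem.Int.floordiv (-(((records.drop i).length : Nat) : Int)) (((ts.length:Nat):Int) + 1)) = (szN : Int) := by
      rw [PySem.Int.neg_floordiv_neg_eq_iff_of_pos hm]
      by_cases hj : j < extra
      · have h1 : szN = per + 1 := by simp [hszN, hj]
        have he1 : (1:Int) ≤ ((extra - j : Nat) : Int) := by omega
        have he2 : ((extra - j : Nat) : Int) ≤ (ts.length:Int) + 1 := by omega
        rw [h1]; push_cast
        constructor <;> nlinarith [hrZ]
      · have h1 : szN = per := by simp [hszN, hj]
        have he : extra - j = 0 := by omega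
        rw [he] at hrZ
        simp only [Nat.cast_zero, add_zero] at hrZ
        rw [h1]
        constructor <;> nlinarith [hrZ]
    rw [hsize, hcut]
    have hsz_le : szN ≤ (records.drop i).length := by
      by_cases hj : j < extra
      · simp only [hszN, if_pos hj]; omega
      · simp only [hszN, if_neg hj]; omega
    simp only [Int.toNat_natCast]
    have hblock : PySem.List.slice records (some (i:Int)) (some ((i:Int) + (szN:Int)))
        = (records.drop i).take szN := by
      rw [PySem.List.slice_natCast_add]
    have hrest : (records.drop i).drop szN = records.drop (i + szN) := by
      rw [List.drop_drop]
    have hrlen : ((records.drop i).length : Int) - (szN : Int)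
        = ((records.drop (i + szN)).length : Int) := by
      simp only [List.length_drop] at hsz_le ⊢; omega
    rw [hblock, hrest, hrlen]
    have hcast : (i:Int) + (szN:Int) = ((i + szN : Nat) : Int) := by push_cast; ring
    have hjcast : (j:Int) + 1 = ((j+1 : Nat) : Int) := by push_cast; ring
    have hLcast : ((ts.length:Nat):Int) + 1 - 1 = ((ts.length : Nat) : Int) := by ring
    rw [hcast, hjcast, hLcast]
    refine ih (j+1) (i + szN) _ (by omega) ?_
    by_cases hj : j < extra
    · simp only [hszN, if_pos hj]; omega
    · simp only [hszN, if_neg hj]; omega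

lemma pvLoopB_init :
    ∀ (ps : List (String × Int)) (rest : List Int) (r : Int) (d d' : PySem.Dict String (List Int)),
    d.keys.Nodup → d'.keys.Nodup →
    d.keys = PySem.Set.update d'.keys (ps.map Prod.fst) →
    (∀ k, k ∉ ps.map Prod.fst → d.get? k = d'.get? k) →
    (pvLoopB rest r ps d).items = (pvLoopB rest r ps d').items := by
  intro ps
  induction ps with
  | nil =>
    intro rest r d d' hnd hnd' hkeys hget
    simp only [List.map_nil, PySem.Set.update_nil] at hkeys
    simp only [pvLoopB]
    rw [PySem.Dict.items_eq_map_keys d hnd ([] : List Int),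
        PySem.Dict.items_eq_map_keys d' hnd' ([] : List Int), hkeys]
    refine List.map_congr_left ?_
    intro k _
    have := hget k (by simp)
    simp [PySem.Dict.getD_eq_get?_getD, this]
  | cons p ps ih =>
    intro rest r d d' hnd hnd' hkeys hget
    obtain ⟨t, m⟩ := p
    simp only [List.map_cons] at hkeys hget
    simp only [pvLoopB]
    apply ih
    · exact PySem.Dict.nodup_keys_insert _ _ _ hnd
    · exact PySem.Dict.nodup_keys_insert _ _ _ hnd'
    · -- keys bookkeeping
      have htmem : t ∈ d.keys := by
        rw [hkeys]; exact (PySem.Set.mem_update _ _ _).mpr (Or.inr (by simp))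
      have h1 : (d.insert t (rest.take (-(PySem.Int.floordiv (-r) m)).toNat)).keys = d.keys := by
        exact PySem.Dict.keys_insert_of_contains _ _ ((PySem.Dict.contains_iff_mem_keys _ _).mpr htmem)
      rw [h1, hkeys, PySem.Set.update_cons]
      by_cases hc : t ∈ d'.keys
      · rw [PySem.Set.add_of_mem hc,
            PySem.Dict.keys_insert_of_contains _ _ ((PySem.Dict.contains_iff_mem_keys _ _).mpr hc)]
      · rw [PySem.Set.add_of_not_mem hc,
            PySem.Dict.keys_insert_of_not_contains _ _ (by
              rw [← Bool.not_eq_true, PySem.Dict.contains_iff_mem_keys]; exact hc)]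
    · intro k hk
      by_cases hkt : k = t
      · subst hkt; rw [PySem.Dict.get?_insert_self, PySem.Dict.get?_insert_self]
      · rw [PySem.Dict.get?_insert_of_ne _ _ hkt, PySem.Dict.get?_insert_of_ne _ _ hkt]
        exact hget k (by simp [hkt, hk])

lemma pvLoopB_nil (ps : List (String × Int)) :
    ∀ (d : PySem.Dict String (List Int)),
    pvLoopB [] 0 ps d = ps.foldl (fun d p => d.insert p.1 ([] : List Int)) d := by
  induction ps with
  | nil => intro d; simp [pvLoopB]
  | cons p ps ih =>
    intro d
    obtain ⟨t, m⟩ := p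
    simp only [pvLoopB, List.foldl_cons]
    have h0 : -(PySem.Int.floordiv (-(0:Int)) m) = 0 := by
      norm_num
      by_cases hm : m = 0 <;> simp [PySem.Int.floordiv, hm]
    rw [h0]
    simp only [Int.toNat_zero, List.take_zero, List.drop_zero, sub_zero]
    rw [ih]

lemma pv_main_eq : ∀ (records : List Int) (teams : List String),
    distribute_sequential records teams = distribute_sequential_alt records teams := by
  intro records teams
  unfold distribute_sequential distribute_sequential_alt
  simp only [PySem.List.len_eq]
  have hzipfst : (teams.zip (PySem.List.pyRange (teams.length : Int) 0 (-1))).map Prod.fst = teams := by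
    apply List.map_fst_zip
    rw [PySem.List.length_pyRange_neg_one]
    simp
  by_cases hts : teams = []
  · subst hts
    simp [pvLoopB, PySem.Dict.empty]
  · have hinitkeys : (teams.foldl (fun d t => d.insert t ([] : List Int)) PySem.Dict.empty).keys
        = PySem.Set.update (PySem.Dict.empty : PySem.Dict String (List Int)).keys teams := by
      exact PySem.Dict.keys_foldl_insert teams (fun _ _ => []) _
    have hinitnodup : (teams.foldl (fun d t => d.insert t ([] : List Int)) PySem.Dict.empty).keys.Nodup := by
      exact PySem.Dict.nodup_keys_foldl_insert teams (fun _ _ => []) _ (by simp [PySem.Dict.keys_empty])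
    have hinitget : ∀ k, k ∉ teams →
        (teams.foldl (fun d t => d.insert t ([] : List Int)) PySem.Dict.empty).get? k
          = (PySem.Dict.empty : PySem.Dict String (List Int)).get? k := by
      intro k hk
      rw [PySem.Dict.get?_empty, PySem.Dict.get?_eq_none_iff_not_mem_keys, hinitkeys]
      rw [PySem.Set.mem_update _ _ _]
      simp [PySem.Dict.keys_empty, hk]
    by_cases hrec : records = []
    · subst hrec
      simp only [List.length_nil, Nat.cast_zero]
      rw [if_pos (Or.inr trivial), pvLoopB_nil]
      have hfold : List.foldl (fun d p => d.insert p.1 ([] : List Int)) PySem.Dict.empty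
            (teams.zip (PySem.List.pyRange (teams.length : Int) 0 (-1)))
          = List.foldl (fun d t => d.insert t ([] : List Int)) PySem.Dict.empty teams := by
        conv_rhs => rw [← hzipfst]
        simp only [List.foldl_map]
      rw [hfold]
    · rw [if_neg (by simp [hts, hrec])]
      have hk0 : 0 < teams.length := List.length_pos_of_ne_nil hts
      rw [PySem.Int.floordiv_natCast, PySem.Int.mod_natCast]
      have hdm := Nat.div_add_mod records.length teams.length
      have hcomm : records.length / teams.length * teams.length
          = teams.length * (records.length / teams.length) := Nat.mul_comm _ _
      have h1 := pvLoops_eq records (records.length / teams.length) (records.length % teams.length)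
        teams 0 0 (teams.foldl (fun d t => d.insert t ([] : List Int)) PySem.Dict.empty)
        (by have := Nat.mod_lt records.length hk0; omega)
        (by omega)
      simp only [Nat.cast_zero, List.drop_zero] at h1
      rw [h1]
      exact pvLoopB_init _ records _ _ _ hinitnodup (by simp [PySem.Dict.keys_empty])
        (by rw [hinitkeys, hzipfst]) (by rw [hzipfst]; exact hinitget)

-- ===== VERDICT (by name: the statement is the Claim_ definition above) =====
theorem distribute_sequential_spec : Claim_equal_distribute_sequential := by
  intro records teams _
  unfold Spec_distribute_sequential
  exact pv_main_eq records teams
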